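-- pv_equiv track=rewrite | github.com/FARAD56/A2SV | destroyer.py | destroyer
-- ===== SOURCE A (Python) =====
-- from collections import Counter
--
-- def destroyer(array):
--     counts = Counter(array)
--     sorted_counts = dict(sorted(counts.items()))
--     keyarr, valuearr = [],[]
--     for key in sorted_counts:
--         keyarr.append(key)
--         valuearr.append(sorted_counts[key])
--
--     if keyarr[0] != 0:
--         return 'NO'
--
--
--     for i in range(1,len(keyarr)):
--         if (0 <= keyarr[i] - keyarr[i-1] <= 1) and (valuearr[i] <= valuearr[i-1]):
--             continue
--         else:
--             return 'NO'
--     return 'YES'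
-- ===== SOURCE B (Python) =====
-- def destroyer(array):
--     counts = {}
--     for x in array:
--         counts[x] = counts.get(x, 0) + 1
--     mn = min(counts)
--     mx = max(counts)
--     if mn != 0 or mx >= len(array):
--         return 'NO'
--     prev = counts[0]
--     for k in range(1, mx + 1):
--         c = counts.get(k, 0)
--         if c > prev:
--             return 'NO'
--         prev = c
--     return 'YES'
-- ===== Notes on version B (the rewrite author's own statement) =====
-- stated objective: faster
-- what changed: Replaces Counter + sort of the distinct keys + parallel key/value arrays by a single hand-built count dict with a bucket scan over the consecutive range 0..max (guarded by max < len(array)), checking counts non-increasing in one pass without sorting.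
import Mathlib
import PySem

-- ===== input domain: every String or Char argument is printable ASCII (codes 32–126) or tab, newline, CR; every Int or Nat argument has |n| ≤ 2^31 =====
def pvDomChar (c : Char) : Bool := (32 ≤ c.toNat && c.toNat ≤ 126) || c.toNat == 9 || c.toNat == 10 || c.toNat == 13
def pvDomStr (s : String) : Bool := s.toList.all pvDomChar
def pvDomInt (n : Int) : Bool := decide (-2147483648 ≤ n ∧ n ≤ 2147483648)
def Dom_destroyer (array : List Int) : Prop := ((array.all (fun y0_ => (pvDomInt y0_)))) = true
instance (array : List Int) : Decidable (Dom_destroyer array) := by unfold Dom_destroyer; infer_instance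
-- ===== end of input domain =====

-- B replaces A's sort of the distinct keys by a bucket scan over the consecutive key range
-- 0..max (guarded by max < len(array)), checking the counts non-increasing in one pass.

-- ===== PORT A =====
-- 'for i in range(1, len(keyarr)): if (0 <= keyarr[i]-keyarr[i-1] <= 1) and (valuearr[i] <= valuearr[i-1]): continue else: return "NO"'
def destroyerLoop (keyarr valuearr : List Int) : List Int → String
  | [] => "YES"
  | i :: rest =>
      if (0 ≤ PySem.List.pyGetD keyarr i 0 - PySem.List.pyGetD keyarr (i-1) 0
            ∧ PySem.List.pyGetD keyarr i 0 - PySem.List.pyGetD keyarr (i-1) 0 ≤ 1)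
          ∧ PySem.List.pyGetD valuearr i 0 ≤ PySem.List.pyGetD valuearr (i-1) 0
      then destroyerLoop keyarr valuearr rest
      else "NO"

def destroyer (array : List Int) : String :=
  let counts := PySem.Dict.counter array
  -- sorted(counts.items()) compares (key, count) tuples; Counter keys are distinct, so the
  -- comparison never reaches the second component: sorting by key is exact here
  let sorted_counts := PySem.Dict.ofList (PySem.List.sorted counts.items (fun p => p.1))
  -- 'for key in sorted_counts: keyarr.append(key); valuearr.append(sorted_counts[key])'
  -- (sorted_counts[key] cannot raise: key iterates the dict's own keys, so getD is exact)
  let arrs := sorted_counts.keys.foldl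
      (fun (p : List Int × List Int) key => (p.1 ++ [key], p.2 ++ [sorted_counts.getD key 0]))
      ([], [])
  let keyarr := arrs.1
  let valuearr := arrs.2
  match PySem.List.pyGet? keyarr 0 with
  | none => "NO"   -- Python raises IndexError here (array = []); excluded by Pre_destroyer
  | some k0 =>
      if k0 ≠ 0 then "NO"
      else destroyerLoop keyarr valuearr (PySem.List.pyRange 1 (keyarr.length : Int))

-- ===== PORT B =====
-- 'prev = counts[0]; for k in range(1, mx+1): c = counts.get(k,0); if c > prev: return "NO"; prev = c'
def destroyerAltLoop (counts : PySem.Dict Int Int) : Int → List Int → String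
  | _, [] => "YES"
  | prev, k :: rest =>
      let c := counts.getD k 0
      if c > prev then "NO" else destroyerAltLoop counts c rest

def destroyer_alt (array : List Int) : String :=
  let counts := array.foldl (fun d x => d.insert x (d.getD x 0 + 1)) PySem.Dict.empty
  match PySem.List.min? counts.keys (fun k => k), PySem.List.max? counts.keys (fun k => k) with
  | some mn, some mx =>
      if mn ≠ 0 ∨ (array.length : Int) ≤ mx then "NO"
      else destroyerAltLoop counts (counts.getD 0 0) (PySem.List.pyRange 1 (mx + 1))
  | _, _ => "NO"   -- Python raises ValueError here (min of empty dict, array = []); excluded by Pre_destroyer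

-- ===== PRECONDITION & SPEC =====
-- On array = [] both programs raise (A: IndexError on keyarr[0]; B: ValueError on min(counts)).
def Pre_destroyer (array : List Int) : Prop := array ≠ []
instance (array : List Int) : Decidable (Pre_destroyer array) := by unfold Pre_destroyer; infer_instance

def pvWitness_destroyer : List Int := [0, 1, 0]

def Spec_destroyer (array : List Int) (out : String) : Prop := out = destroyer_alt array
instance (array : List Int) (out : String) : Decidable (Spec_destroyer array out) := by unfold Spec_destroyer; infer_instance

-- ===== CLAIM (what is proved, stated in full; the proofs are below) =====
def Claim_equal_destroyer : Prop := ∀ (array : List Int), Dom_destroyer array → Pre_destroyer array → Spec_destroyer array (destroyer array)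

-- ===== LEMMAS AND PROOFS =====

def pvK (array : List Int) : List Int :=
  PySem.List.sorted (PySem.Set.ofList array) (fun k => k)

def pvCnt (array : List Int) (k : Int) : Int := (array.count k : Int)

lemma pvK_nodup (array : List Int) : (pvK array).Nodup :=
  ((PySem.List.sorted_perm _ _ _).nodup_iff).mpr (PySem.Set.nodup_ofList array)

lemma pvK_pairwise (array : List Int) : (pvK array).Pairwise (· < ·) :=
  PySem.List.sorted_ofList_pairwise_lt array

lemma pvK_mem (array : List Int) (k : Int) : k ∈ pvK array ↔ k ∈ array := by
  unfold pvK
  rw [PySem.List.mem_sorted, PySem.Set.mem_ofList]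

lemma sortedItems_eq (array : List Int) :
    PySem.List.sorted (PySem.Dict.counter array).items (fun p => p.1)
      = (pvK array).map (fun k => (k, pvCnt array k)) := by
  rw [PySem.Dict.items_counter]
  apply PySem.List.sorted_eq_of_perm_of_pairwise_lt
  · exact (PySem.List.sorted_perm _ _ _).map _
  · exact (pvK_pairwise array).map _ (by intro a b h; simpa using h)

lemma ofList_items_of_nodup (ys : List (Int × Int)) (h : (ys.map Prod.fst).Nodup) :
    (PySem.Dict.ofList ys).items = ys := by
  have := PySem.Dict.items_foldl_insert_fresh ys Prod.fst Prod.snd PySem.Dict.empty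
      (fun a _ => by simp [PySem.Dict.contains_empty]) h
  simpa [PySem.Dict.ofList, PySem.Dict.update] using this

def pvCondA (ka va : List Int) (i : Int) : Bool :=
  decide ((0 ≤ PySem.List.pyGetD ka i 0 - PySem.List.pyGetD ka (i-1) 0
     ∧ PySem.List.pyGetD ka i 0 - PySem.List.pyGetD ka (i-1) 0 ≤ 1)
   ∧ PySem.List.pyGetD va i 0 ≤ PySem.List.pyGetD va (i-1) 0)

lemma destroyerLoop_eq (ka va : List Int) (l : List Int) :
    destroyerLoop ka va l = if l.all (pvCondA ka va) then "YES" else "NO" := by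
  induction l with
  | nil => simp [destroyerLoop]
  | cons x t ih =>
      simp only [destroyerLoop, ih, List.all_cons, pvCondA, Bool.and_eq_true, decide_eq_true_eq]
      split_ifs <;> tauto

lemma destroyer_eq (array : List Int) :
    destroyer array =
      match PySem.List.pyGet? (pvK array) 0 with
      | none => "NO"
      | some k0 =>
          if k0 ≠ 0 then "NO"
          else destroyerLoop (pvK array) ((pvK array).map (pvCnt array))
                 (PySem.List.pyRange 1 ((pvK array).length : Int)) := by
  simp only [destroyer]
  rw [sortedItems_eq]
  have hfst : (((pvK array).map (fun k => (k, pvCnt array k))).map Prod.fst) = pvK array := by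
    simp [List.map_map, Function.comp_def]
  have hitems := ofList_items_of_nodup _ (by rw [hfst]; exact pvK_nodup array)
  have hkeys : (PySem.Dict.ofList ((pvK array).map (fun k => (k, pvCnt array k)))).keys = pvK array := by
    simp only [PySem.Dict.keys, hitems]
    exact hfst
  have hgetD : ∀ k ∈ pvK array,
      (PySem.Dict.ofList ((pvK array).map (fun k => (k, pvCnt array k)))).getD k 0 = pvCnt array k := by
    intro k hk
    refine PySem.Dict.getD_of_mem_items _ ?_ (by rw [hkeys]; exact pvK_nodup array) 0
    rw [hitems]
    exact List.mem_map_of_mem hk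
  rw [PySem.List.foldl_prod_mk
        (f := fun acc key => acc ++ [key])
        (g := fun acc key => acc ++ [(PySem.Dict.ofList ((pvK array).map (fun k => (k, pvCnt array k)))).getD key 0])]
  rw [PySem.List.foldl_append_singleton_eq_self, PySem.List.foldl_append_singleton_eq_map, hkeys]
  simp only [List.nil_append]
  rw [List.map_congr_left hgetD]

lemma destroyerAltLoop_cases (d : PySem.Dict Int Int) (p : Int) (l : List Int) :
    destroyerAltLoop d p l = "YES" ∨ destroyerAltLoop d p l = "NO" := by
  induction l generalizing p with
  | nil => left; rfl
  | cons x t ih =>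
      simp only [destroyerAltLoop]
      split_ifs
      · right; rfl
      · exact ih _

lemma destroyerAltLoop_yes (d : PySem.Dict Int Int) (b : Int) :
    ∀ (n : Nat) (a : Int), (b - a).toNat = n →
      (destroyerAltLoop d (d.getD (a-1) 0) (PySem.List.pyRange a b) = "YES" ↔
        ∀ k : Int, a ≤ k → k < b → d.getD k 0 ≤ d.getD (k-1) 0) := by
  intro n
  induction n with
  | zero =>
      intro a ha
      have hba : b ≤ a := by omega
      rw [PySem.List.pyRange_one_eq_nil hba]
      constructor
      · intro _ k hk1 hk2; omega
      · intro _; rfl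
  | succ m ih =>
      intro a ha
      have hab : a < b := by omega
      rw [PySem.List.pyRange_one_cons hab]
      simp only [destroyerAltLoop]
      split_ifs with h
      · constructor
        · intro hc; exact absurd hc (by decide)
        · intro hall
          exact absurd (hall a le_rfl hab) (by omega)
      · have ih' := ih (a+1) (by omega)
        have : a + 1 - 1 = a := by omega
        rw [this] at ih'
        rw [ih']
        constructor
        · intro hall k hk1 hk2
          rcases eq_or_lt_of_le hk1 with rfl | hlt
          · omega
          · exact hall k (by omega) hk2
        · intro hall k hk1 hk2
          exact hall k (by omega) hk2

lemma destroyer_alt_eq (array : List Int) :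
    destroyer_alt array =
      match PySem.List.min? (PySem.Set.ofList array) (fun k => k),
            PySem.List.max? (PySem.Set.ofList array) (fun k => k) with
      | some mn, some mx =>
          if mn ≠ 0 ∨ (array.length : Int) ≤ mx then "NO"
          else destroyerAltLoop (PySem.Dict.counter array) (pvCnt array 0)
                 (PySem.List.pyRange 1 (mx + 1))
      | _, _ => "NO" := by
  simp only [destroyer_alt, PySem.Dict.foldl_insert_getD_add_one_eq_counter,
    PySem.Dict.keys_counter, PySem.Dict.getD_counter]
  rfl

lemma cnt_pos_of_chain (c : Int → Int) (mx : Int)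
    (hchain : ∀ k : Int, 1 ≤ k → k ≤ mx → c k ≤ c (k-1)) (hmx : 1 ≤ c mx) :
    ∀ k : Int, 0 ≤ k → k ≤ mx → 1 ≤ c k := by
  intro k hk0 hkm
  have H : ∀ (n : Nat) (k : Int), 0 ≤ k → k ≤ mx → (mx - k).toNat = n → 1 ≤ c k := by
    intro n
    induction n with
    | zero => intro k h0 h1 h2
              have : k = mx := by omega
              rwa [this]
    | succ m ih =>
        intro k h0 h1 h2
        have h3 : k < mx := by omega
        have := ih (k+1) (by omega) (by omega) (by omega)
        have h4 := hchain (k+1) (by omega) (by omega)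
        simp only [add_sub_cancel_right] at h4
        omega
  exact H (mx - k).toNat k hk0 hkm rfl

lemma pyRange_zero_length (m : Nat) : (PySem.List.pyRange 0 (m : Int)).length = m := by
  rw [PySem.List.pyRange_zero_natCast]
  simp

lemma pyRange_zero_getElem (m : Nat) (i : Nat) (h : i < (PySem.List.pyRange 0 (m : Int)).length) :
    (PySem.List.pyRange 0 (m : Int))[i] = (i : Int) := by
  have h' : i < m := by rwa [pyRange_zero_length] at h
  simp [PySem.List.pyRange_zero_natCast]

lemma pyRange_zero_pairwise (m : Nat) :
    (PySem.List.pyRange 0 (m : Int)).Pairwise (· < ·) := by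
  rw [PySem.List.pyRange_zero_natCast]
  exact List.pairwise_lt_range.map _ (by intro a b h; exact_mod_cast h)

lemma pyRange_zero_mem (m : Nat) (k : Int) :
    k ∈ PySem.List.pyRange 0 (m : Int) ↔ 0 ≤ k ∧ k < (m : Int) :=
  PySem.List.mem_pyRange_one

lemma pyRange_pyGetD (m : Nat) (i : Int) (h1 : 0 ≤ i) (h2 : i < (m : Int)) :
    PySem.List.pyGetD (PySem.List.pyRange 0 (m : Int)) i 0 = i := by
  rw [PySem.List.pyGetD_eq_getElem _ _ h1 (by rw [pyRange_zero_length]; exact_mod_cast h2),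
      pyRange_zero_getElem _ _ (by rw [pyRange_zero_length]; omega)]
  omega

lemma pyRange_map_pyGetD (m : Nat) (f : Int → Int) (i : Int) (h1 : 0 ≤ i) (h2 : i < (m : Int)) :
    PySem.List.pyGetD ((PySem.List.pyRange 0 (m : Int)).map f) i 0 = f i := by
  rw [PySem.List.pyGetD_eq_getElem _ _ h1 (by rw [List.length_map, pyRange_zero_length]; exact_mod_cast h2)]
  rw [List.getElem_map]
  rw [pyRange_zero_getElem _ _ (by rw [pyRange_zero_length]; omega)]
  congr 1
  omega

lemma K_getElem_eq_of_A (array : List Int)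
    (h0 : PySem.List.pyGet? (pvK array) 0 = some 0)
    (hcond : ∀ i ∈ PySem.List.pyRange 1 ((pvK array).length : Int),
        pvCondA (pvK array) ((pvK array).map (pvCnt array)) i = true) :
    ∀ i : Nat, (h : i < (pvK array).length) → (pvK array)[i] = (i : Int) := by
  intro i
  induction i with
  | zero =>
      intro h
      rw [PySem.List.pyGet?_eq_some_getElem _ le_rfl (by exact_mod_cast h)] at h0
      simpa using h0
  | succ j ih =>
      intro h
      have hj : j < (pvK array).length := by omega
      have hKj := ih hj
      have hmem : ((j+1 : Nat) : Int) ∈ PySem.List.pyRange 1 ((pvK array).length : Int) := by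
        rw [PySem.List.mem_pyRange_one]
        constructor
        · exact_mod_cast Nat.succ_le_succ (Nat.zero_le j)
        · exact_mod_cast h
      have hc := hcond _ hmem
      simp only [pvCondA, decide_eq_true_eq] at hc
      have e1 : PySem.List.pyGetD (pvK array) ((j+1 : Nat) : Int) 0 = (pvK array)[j+1] := by
        rw [PySem.List.pyGetD_eq_getElem _ _ (by positivity) (by exact_mod_cast h)]
        simp
      have e2 : PySem.List.pyGetD (pvK array) (((j+1 : Nat) : Int) - 1) 0 = (pvK array)[j] := by
        have h5 : ((j+1 : Nat) : Int) - 1 = ((j : Nat) : Int) := by push_cast; ring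
        rw [h5, PySem.List.pyGetD_eq_getElem _ _ (by positivity) (by exact_mod_cast hj)]
        simp
      rw [e1, e2, hKj] at hc
      have hlt : (pvK array)[j] < (pvK array)[j+1] :=
        (List.pairwise_iff_getElem.mp (pvK_pairwise array)) j (j+1) hj h (by omega)
      rw [hKj] at hlt
      push_cast
      omega

lemma K_eq_range_of_A (array : List Int)
    (h0 : PySem.List.pyGet? (pvK array) 0 = some 0)
    (hcond : ∀ i ∈ PySem.List.pyRange 1 ((pvK array).length : Int),
        pvCondA (pvK array) ((pvK array).map (pvCnt array)) i = true) :
    pvK array = PySem.List.pyRange 0 ((pvK array).length : Int) := by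
  apply List.ext_getElem
  · rw [pyRange_zero_length]
  · intro i h1 h2
    rw [K_getElem_eq_of_A array h0 hcond i h1, pyRange_zero_getElem _ _ h2]

lemma condA_iff_chain (array : List Int) (m : Nat)
    (hK : pvK array = PySem.List.pyRange 0 (m : Int)) :
    ((∀ i ∈ PySem.List.pyRange 1 ((pvK array).length : Int),
        pvCondA (pvK array) ((pvK array).map (pvCnt array)) i = true)
      ↔ (∀ k : Int, 1 ≤ k → k < (m : Int) → pvCnt array k ≤ pvCnt array (k-1))) := by
  have hlen : ((pvK array).length : Int) = (m : Int) := by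
    rw [hK, pyRange_zero_length]
  rw [hlen, hK]
  constructor
  · intro hall k h1 h2
    have hc := hall k (PySem.List.mem_pyRange_one.mpr ⟨h1, h2⟩)
    simp only [pvCondA, decide_eq_true_eq] at hc
    rw [pyRange_map_pyGetD m _ k (by omega) h2,
        pyRange_map_pyGetD m _ (k-1) (by omega) (by omega)] at hc
    exact hc.2
  · intro hall i hi
    rw [PySem.List.mem_pyRange_one] at hi
    simp only [pvCondA, decide_eq_true_eq]
    rw [pyRange_pyGetD m i (by omega) hi.2, pyRange_pyGetD m (i-1) (by omega) (by omega),
        pyRange_map_pyGetD m _ i (by omega) hi.2,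
        pyRange_map_pyGetD m _ (i-1) (by omega) (by omega)]
    refine ⟨⟨by omega, by omega⟩, hall i hi.1 hi.2⟩

lemma destroyer_agree (array : List Int) (hpre : array ≠ []) : destroyer array = destroyer_alt array := by
  -- basic nonemptiness
  have hSne : PySem.Set.ofList array ≠ [] := by
    cases array with
    | nil => exact absurd rfl hpre
    | cons x t =>
        intro hS
        have : x ∈ PySem.Set.ofList (x :: t) := (PySem.Set.mem_ofList _ _).mpr (by simp)
        rw [hS] at this
        exact absurd this (List.not_mem_nil)
  have hKlenS : (pvK array).length = (PySem.Set.ofList array).length :=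
    PySem.List.length_sorted _ _ _
  have hKne : pvK array ≠ [] := by
    intro h
    apply hSne
    have := hKlenS
    rw [h] at this
    exact List.eq_nil_of_length_eq_zero this.symm
  have hn : 0 < (pvK array).length := List.length_pos_iff.mpr hKne
  -- min and max of the key set
  obtain ⟨mn, hmin⟩ : ∃ mn, PySem.List.min? (PySem.Set.ofList array) (fun k => k) = some mn := by
    cases h : PySem.List.min? (PySem.Set.ofList array) (fun k => k) with
    | none => exact absurd ((PySem.List.min?_eq_none_iff _ _).mp h) hSne
    | some m => exact ⟨m, rfl⟩
  obtain ⟨mx, hmax⟩ : ∃ mx, PySem.List.max? (PySem.Set.ofList array) (fun k => k) = some mx := by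
    cases h : PySem.List.max? (PySem.Set.ofList array) (fun k => k) with
    | none => exact absurd ((PySem.List.max?_eq_none_iff _ _).mp h) hSne
    | some m => exact ⟨m, rfl⟩
  have hmnS : mn ∈ PySem.Set.ofList array := PySem.List.min?_mem hmin
  have hmxS : mx ∈ PySem.Set.ofList array := PySem.List.max?_mem hmax
  have hmn_min : ∀ y ∈ PySem.Set.ofList array, mn ≤ y := PySem.List.min?_isMin hmin
  have hmx_max : ∀ y ∈ PySem.Set.ofList array, y ≤ mx := PySem.List.max?_isMax hmax
  have hmem_K : ∀ k : Int, k ∈ pvK array ↔ k ∈ PySem.Set.ofList array := by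
    intro k
    rw [pvK_mem, ← PySem.Set.mem_ofList]
  -- K[0] is the minimum
  have hK0 : (pvK array)[0]'hn = mn := by
    have h1 : (pvK array)[0]'hn ∈ pvK array := List.getElem_mem hn
    have h2 : mn ≤ (pvK array)[0]'hn := hmn_min _ ((hmem_K _).mp h1)
    have h3 : mn ∈ pvK array := (hmem_K mn).mpr hmnS
    obtain ⟨j, hj, hj2⟩ := List.getElem_of_mem h3
    rcases Nat.eq_zero_or_pos j with rfl | hjpos
    · omega
    · have := (List.pairwise_iff_getElem.mp (pvK_pairwise array)) 0 j hn hj hjpos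
      rw [hj2] at this
      omega
  have hget0 : PySem.List.pyGet? (pvK array) 0 = some ((pvK array)[0]'hn) :=
    PySem.List.pyGet?_eq_some_getElem _ le_rfl (by exact_mod_cast hn)
  -- counts in S are positive
  have hcntpos : ∀ k ∈ PySem.Set.ofList array, 1 ≤ pvCnt array k := by
    intro k hk
    have : 0 < array.count k := List.count_pos_iff.mpr ((PySem.Set.mem_ofList _ _).mp hk)
    unfold pvCnt
    exact_mod_cast this
  have hlenS : (PySem.Set.ofList array).length ≤ array.length := PySem.Set.length_ofList_le array
  -- the two yes-conditions are equivalent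
  have hiff :
      (((pvK array)[0]'hn = 0) ∧ ∀ i ∈ PySem.List.pyRange 1 ((pvK array).length : Int),
          pvCondA (pvK array) ((pvK array).map (pvCnt array)) i = true)
        ↔ ((mn = 0 ∧ (mx : Int) < (array.length : Int)) ∧
            ∀ k : Int, 1 ≤ k → k < mx + 1 → pvCnt array k ≤ pvCnt array (k-1)) := by
    constructor
    · rintro ⟨h0, hcond⟩
      have hKr := K_eq_range_of_A array (by rw [hget0, h0]) hcond
      have hmxK := (hmem_K mx).mpr hmxS
      rw [hKr, pyRange_zero_mem] at hmxK
      have hmnK := (hmem_K mn).mpr hmnS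
      rw [hKr, pyRange_zero_mem] at hmnK
      have hmn0 : mn = 0 := by
        have h0K : (0 : Int) ∈ pvK array := by
          rw [hKr, pyRange_zero_mem]
          constructor <;> [exact le_rfl; exact_mod_cast hn]
        have := hmn_min _ ((hmem_K _).mp h0K)
        omega
      refine ⟨⟨hmn0, by omega⟩, ?_⟩
      have hchain := (condA_iff_chain array (pvK array).length hKr).mp hcond
      intro k h1 h2
      exact hchain k h1 (by omega)
    · rintro ⟨⟨hmn0, hmxlen⟩, hchain⟩
      have hmx0 : 0 ≤ mx := by
        have := hmx_max mn hmnS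
        omega
      -- every bucket in [0, mx] is non-empty
      have hpos : ∀ k : Int, 0 ≤ k → k ≤ mx → 1 ≤ pvCnt array k :=
        cnt_pos_of_chain (pvCnt array) mx (fun k h1 h2 => hchain k h1 (by omega))
          (hcntpos mx hmxS)
      -- hence S is exactly {0, …, mx}
      have hmemS : ∀ k : Int, k ∈ PySem.Set.ofList array ↔ (0 ≤ k ∧ k ≤ mx) := by
        intro k
        constructor
        · intro hk
          have := hmn_min k hk
          have := hmx_max k hk
          omega
        · intro hk
          rw [PySem.Set.mem_ofList]
          have := hpos k hk.1 hk.2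
          unfold pvCnt at this
          rw [← List.count_pos_iff (l := array) (a := k)]
          omega
      set m : Nat := (mx + 1).toNat with hm
      have hmcast : (m : Int) = mx + 1 := by omega
      have hKr : pvK array = PySem.List.pyRange 0 (m : Int) := by
        unfold pvK
        apply PySem.List.sorted_eq_of_perm_of_pairwise_lt
        · rw [List.perm_ext_iff_of_nodup
            ((pyRange_zero_pairwise m).imp (fun h => ne_of_lt h))
            (PySem.Set.nodup_ofList array)]
          intro k
          rw [pyRange_zero_mem, hmemS, hmcast]
          omega
        · exact pyRange_zero_pairwise m
      have hlen : (pvK array).length = m := by rw [hKr, pyRange_zero_length]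
      constructor
      · rw [hK0, hmn0]
      · rw [condA_iff_chain array m hKr]
        intro k h1 h2
        exact hchain k h1 (by omega)
  -- assemble
  rw [destroyer_eq, destroyer_alt_eq, hmin, hmax, hget0]
  simp only []
  have hprev : pvCnt array 0 = (PySem.Dict.counter array).getD ((1 : Int)-1) 0 := by
    rw [show ((1:Int)-1) = 0 by norm_num, PySem.Dict.getD_counter]
    rfl
  have hloopB := destroyerAltLoop_yes (PySem.Dict.counter array) (mx+1) (mx+1-1).toNat 1 rfl
  rw [destroyerLoop_eq]
  by_cases hmn0 : mn = 0
  · by_cases hmxlen : (array.length : Int) ≤ mx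
    · -- B rejects on size; A must reject too
      rw [if_neg (show ¬ (pvK array)[0]'hn ≠ 0 by rw [hK0, hmn0]; exact fun h => h rfl)]
      rw [if_pos (Or.inr hmxlen)]
      rw [if_neg]
      intro hall
      have := (hiff.mp ⟨by rw [hK0, hmn0], by
        intro i hi
        exact List.all_eq_true.mp hall i hi⟩).1.2
      omega
    · rw [if_neg (show ¬ (pvK array)[0]'hn ≠ 0 by rw [hK0, hmn0]; exact fun h => h rfl)]
      rw [if_neg (show ¬ (mn ≠ 0 ∨ (array.length : Int) ≤ mx) by push Not; exact ⟨hmn0, by omega⟩)]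
      rw [hprev] at *
      by_cases hchain : ∀ k : Int, 1 ≤ k → k < mx + 1 →
          (PySem.Dict.counter array).getD k 0 ≤ (PySem.Dict.counter array).getD (k-1) 0
      · rw [if_pos]
        · exact (hloopB.mpr (by
            intro k h1 h2
            exact hchain k h1 h2)).symm
        · rw [List.all_eq_true]
          have hchain' : ∀ k : Int, 1 ≤ k → k < mx + 1 → pvCnt array k ≤ pvCnt array (k-1) := by
            intro k h1 h2
            have := hchain k h1 h2
            rw [PySem.Dict.getD_counter, PySem.Dict.getD_counter] at this
            exact this
          exact (hiff.mpr ⟨⟨hmn0, by omega⟩, hchain'⟩).2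
      · rw [if_neg]
        · rcases destroyerAltLoop_cases (PySem.Dict.counter array)
            ((PySem.Dict.counter array).getD ((1:Int)-1) 0) (PySem.List.pyRange 1 (mx+1)) with h | h
          · exfalso
            apply hchain
            exact hloopB.mp h
          · rw [h]
        · intro hall
          apply hchain
          have := (hiff.mp ⟨by rw [hK0, hmn0], List.all_eq_true.mp hall⟩).2
          intro k h1 h2
          have := this k h1 h2
          rw [PySem.Dict.getD_counter, PySem.Dict.getD_counter]
          unfold pvCnt at this
          exact this
  · -- mn ≠ 0 : both sides reject
    rw [if_pos (show (pvK array)[0]'hn ≠ 0 by rw [hK0]; exact hmn0), if_pos (Or.inl hmn0)]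

-- ===== VERDICT (by name: the statement is the Claim_ definition above) =====
theorem destroyer_spec : Claim_equal_destroyer := by
  intro array _ hpre
  unfold Spec_destroyer
  exact destroyer_agree array hpre
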